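-- pv_equiv track=rewrite | github.com/suhassrivats/sysadmin-scripts | flavor_aggregate_match.py | compare_two_dicts
-- ===== SOURCE A (Python) =====
-- def compare_two_dicts(flavor_dict_prop, aggregate_dict_prop):
--     """
--     For each flavor compare it with all aggregates and see if there is a match
--     """
--
--     # Initialize dictionaries for storing common properties
--     flavor_dict_common = dict()
--     aggregate_dict_common = dict()
--
--     flavor_dict_set = set(flavor_dict_prop)
--     aggregate_dict_set = set(aggregate_dict_prop)
--
--     # Get the common properties of both dictionaries
--     common_props = flavor_dict_set.intersection(aggregate_dict_set)
--
--     # Make respective dictionaries with these common properties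
--     for prop in common_props:
--         flavor_dict_common[prop] = flavor_dict_prop[prop]
--         aggregate_dict_common[prop] = aggregate_dict_prop[prop]
--
--     # Return True if equal, False otherwise
--     return flavor_dict_common == aggregate_dict_common
-- ===== SOURCE B (Python) =====
-- def compare_two_dicts(flavor_dict_prop, aggregate_dict_prop):
--     """
--     For each flavor compare it with all aggregates and see if there is a match
--     """
--     # One direct pass over one dict's keys with a membership test on the other:
--     # compare exactly the common keys, short-circuiting on the first mismatch.
--     return all(flavor_dict_prop[k] == aggregate_dict_prop[k]
--                for k in flavor_dict_prop if k in aggregate_dict_prop)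
-- ===== Notes on version B (the rewrite author's own statement) =====
-- stated objective: simpler
-- what changed: Replaces A's two key-sets, their intersection and the two intermediate common-key dictionaries compared with dict equality by a single short-circuiting pass over one dict's keys with a membership test on the other.
import Mathlib
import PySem

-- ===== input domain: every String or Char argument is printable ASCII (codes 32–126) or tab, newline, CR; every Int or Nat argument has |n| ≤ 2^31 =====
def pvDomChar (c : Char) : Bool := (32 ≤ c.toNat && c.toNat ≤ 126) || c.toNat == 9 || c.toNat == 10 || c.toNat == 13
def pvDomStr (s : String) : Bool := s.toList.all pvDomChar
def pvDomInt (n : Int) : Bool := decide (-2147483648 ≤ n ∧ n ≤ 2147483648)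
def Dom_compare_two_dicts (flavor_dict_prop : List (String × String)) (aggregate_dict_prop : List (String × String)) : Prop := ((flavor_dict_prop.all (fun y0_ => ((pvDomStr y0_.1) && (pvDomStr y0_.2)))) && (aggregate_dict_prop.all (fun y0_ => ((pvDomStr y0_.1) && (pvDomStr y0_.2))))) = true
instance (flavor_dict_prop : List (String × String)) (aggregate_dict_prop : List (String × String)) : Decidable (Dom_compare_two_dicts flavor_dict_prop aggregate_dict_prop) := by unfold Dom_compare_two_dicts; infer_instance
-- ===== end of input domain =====

-- B drops A's set construction, intersection and the two common-key dictionaries for one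
-- direct pass over one dict's keys with a membership test on the other (objective: simpler).

-- ===== PORT A =====
-- The dict arguments are association lists (insertion order, first-match lookup).
def compare_two_dicts (flavor_dict_prop : List (String × String)) (aggregate_dict_prop : List (String × String)) : Bool :=
  let fd : PySem.Dict String String := PySem.Dict.mk flavor_dict_prop
  let ad : PySem.Dict String String := PySem.Dict.mk aggregate_dict_prop
  let flavor_dict_set := PySem.Set.ofList fd.keys
  let aggregate_dict_set := PySem.Set.ofList ad.keys
  let common_props := PySem.Set.inter flavor_dict_set aggregate_dict_set
  -- the loop over common_props (Python iterates the set in hash order; the resulting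
  -- dicts are only compared with ==, which ignores order, so any order is exact);
  -- fd[prop] / ad[prop] cannot raise since prop is a key of both, so getD is exact
  let flavor_dict_common := common_props.foldl (fun d k => d.insert k (fd.getD k "")) PySem.Dict.empty
  let aggregate_dict_common := common_props.foldl (fun d k => d.insert k (ad.getD k "")) PySem.Dict.empty
  -- Python dict ==: equal size and every item of one found in the other (order-independent)
  (flavor_dict_common.size == aggregate_dict_common.size) &&
    flavor_dict_common.items.all (fun p => aggregate_dict_common.get? p.1 == some p.2)

-- ===== PORT B =====
-- 'for k in flavor_dict_prop' iterates the dict's (distinct) keys in insertion order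
def compare_two_dicts_alt (flavor_dict_prop : List (String × String)) (aggregate_dict_prop : List (String × String)) : Bool :=
  let fd : PySem.Dict String String := PySem.Dict.mk flavor_dict_prop
  let ad : PySem.Dict String String := PySem.Dict.mk aggregate_dict_prop
  (PySem.Set.ofList fd.keys).all (fun k =>
    !(ad.contains k) || (fd.getD k "" == ad.getD k ""))

-- ===== PRECONDITION & SPEC =====
def Spec_compare_two_dicts (flavor_dict_prop : List (String × String)) (aggregate_dict_prop : List (String × String)) (out : Bool) : Prop := out = compare_two_dicts_alt flavor_dict_prop aggregate_dict_prop
instance (flavor_dict_prop : List (String × String)) (aggregate_dict_prop : List (String × String)) (out : Bool) : Decidable (Spec_compare_two_dicts flavor_dict_prop aggregate_dict_prop out) := by unfold Spec_compare_two_dicts; infer_instance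

-- ===== CLAIM (what is proved, stated in full; the proofs are below) =====
def Claim_equal_compare_two_dicts : Prop := ∀ (flavor_dict_prop : List (String × String)) (aggregate_dict_prop : List (String × String)), Dom_compare_two_dicts flavor_dict_prop aggregate_dict_prop → Spec_compare_two_dicts flavor_dict_prop aggregate_dict_prop (compare_two_dicts flavor_dict_prop aggregate_dict_prop)

-- ===== LEMMAS AND PROOFS =====

theorem pv_common_items (f : List (String × String)) (common : List String) (hnd : common.Nodup) :
    (common.foldl (fun d k => d.insert k ((PySem.Dict.mk f).getD k "")) PySem.Dict.empty).items
      = common.map (fun k => (k, (PySem.Dict.mk f).getD k "")) := by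
  have h := PySem.Dict.items_foldl_insert_fresh common (fun k => k)
      (fun k => (PySem.Dict.mk f).getD k "") PySem.Dict.empty
      (fun x _ => PySem.Dict.contains_empty x) (by simpa using hnd)
  simpa using h

theorem compare_two_dicts_eq (f a : List (String × String)) :
    compare_two_dicts f a = compare_two_dicts_alt f a := by
  simp only [compare_two_dicts, compare_two_dicts_alt]
  set fd : PySem.Dict String String := PySem.Dict.mk f with hfd
  set ad : PySem.Dict String String := PySem.Dict.mk a with had
  set common := PySem.Set.inter (PySem.Set.ofList fd.keys) (PySem.Set.ofList ad.keys) with hcommon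
  have hnd : common.Nodup :=
    PySem.Set.nodup_inter _ _ (PySem.Set.nodup_ofList _)
  have hfi := pv_common_items f common hnd
  have hai := pv_common_items a common hnd
  rw [← hfd] at hfi
  rw [← had] at hai
  have hakeys : (common.foldl (fun d k => d.insert k (ad.getD k "")) PySem.Dict.empty).keys = common := by
    simp [PySem.Dict.keys, hai, Function.comp_def]
  have hget : ∀ k ∈ common,
      (common.foldl (fun d k => d.insert k (ad.getD k "")) PySem.Dict.empty).get? k = some (ad.getD k "") := by
    intro k hk
    exact PySem.Dict.get?_of_mem_items _ (by rw [hai]; exact List.mem_map_of_mem hk)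
      (by rw [hakeys]; exact hnd)
  rw [Bool.eq_iff_iff]
  simp only [Bool.and_eq_true, beq_iff_eq, List.all_eq_true, PySem.Dict.size, hfi, hai,
    List.length_map, Bool.or_eq_true, Bool.not_eq_true', List.mem_map]
  constructor
  · rintro ⟨-, h⟩ k hkS
    rcases eq_or_ne (ad.contains k) true with hc | hc
    · have hkc : k ∈ common := by
        rw [hcommon]
        refine List.mem_filter.mpr ⟨hkS, ?_⟩
        exact (PySem.Set.contains_iff _ _).mpr ((PySem.Set.mem_ofList _ _).mpr
          ((PySem.Dict.contains_iff_mem_keys ad k).mp hc))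
      have := h _ ⟨k, hkc, rfl⟩
      rw [hget k hkc] at this
      right; exact (Option.some_inj.mp this).symm
    · left; simpa using hc
  · intro h
    refine ⟨trivial, ?_⟩
    rintro p ⟨k, hkc, rfl⟩
    have hkS : k ∈ PySem.Set.ofList fd.keys := (List.mem_filter.mp (hcommon ▸ hkc)).1
    have hkT : ad.contains k = true := by
      have := (List.mem_filter.mp (hcommon ▸ hkc)).2
      exact (PySem.Dict.contains_iff_mem_keys ad k).mpr
        ((PySem.Set.mem_ofList _ _).mp ((PySem.Set.contains_iff _ _).mp this))
    rcases h k hkS with hfalse | heq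
    · rw [hkT] at hfalse; cases hfalse
    · rw [hget k hkc, heq]

-- ===== VERDICT (by name: the statement is the Claim_ definition above) =====
theorem compare_two_dicts_spec : Claim_equal_compare_two_dicts := by
  intro f a _
  unfold Spec_compare_two_dicts
  exact compare_two_dicts_eq f a
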